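-- pv_equiv track=rewrite | github.com/Denisov21/Songpressplusplus | src/songpressPlusPlus/SongpressFrame.py | _raw_pos_from_visible
-- ===== SOURCE A (Python) =====
-- def _raw_pos_from_visible(s, vis_pos):
--     """
--     Convert a visible-character index back to a raw string index.
--     Returns the raw index where the vis_pos-th non-'_' character starts.
--     If vis_pos >= number of visible chars, returns len(s).
--     """
--     count = 0
--     for idx, c in enumerate(s):
--         if c != '_':
--             if count == vis_pos:
--                 return idx
--             count += 1
--     return len(s)
-- ===== SOURCE B (Python) =====
-- def _raw_pos_from_visible(s, vis_pos):
--     positions = [i for i, c in enumerate(s) if c != '_']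
--     if 0 <= vis_pos < len(positions):
--         return positions[vis_pos]
--     return len(s)
-- ===== Notes on version B (the rewrite author's own statement) =====
-- stated objective: simpler
-- what changed: Replaces the interleaved scan-count-and-early-return loop by building the index table of non-'_' positions in one comprehension and doing a single guarded lookup.
import Mathlib
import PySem

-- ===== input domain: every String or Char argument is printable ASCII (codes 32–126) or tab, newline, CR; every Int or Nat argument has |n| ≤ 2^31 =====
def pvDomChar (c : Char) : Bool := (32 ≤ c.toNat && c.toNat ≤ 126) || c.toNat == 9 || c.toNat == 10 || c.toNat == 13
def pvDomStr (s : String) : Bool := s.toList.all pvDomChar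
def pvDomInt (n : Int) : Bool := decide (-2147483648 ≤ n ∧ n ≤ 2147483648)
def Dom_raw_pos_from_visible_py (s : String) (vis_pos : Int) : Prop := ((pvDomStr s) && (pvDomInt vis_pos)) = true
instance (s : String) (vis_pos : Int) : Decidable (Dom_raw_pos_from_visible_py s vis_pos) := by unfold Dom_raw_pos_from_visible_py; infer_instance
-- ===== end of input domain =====

-- B replaces A's scan-count-and-early-return loop by an index table of non-'_' positions
-- plus a single guarded lookup (objective: simpler).

-- ===== PORT A =====
-- the for-loop with early return: none = loop fell through
def rawA_loop : List (Int × Char) → Int → Int → Option Int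
  | [], _, _ => none
  | (idx, c) :: rest, vis_pos, count =>
    if c ≠ '_' then
      if count = vis_pos then some idx
      else rawA_loop rest vis_pos (count + 1)
    else rawA_loop rest vis_pos count

def raw_pos_from_visible_py (s : String) (vis_pos : Int) : Int :=
  match rawA_loop (PySem.List.enumerate s.toList) vis_pos 0 with
  | some i => i
  | none => (s.toList.length : Int)

-- ===== PORT B =====
def raw_pos_from_visible_py_alt (s : String) (vis_pos : Int) : Int :=
  let positions := (PySem.List.enumerate s.toList).filterMap
    (fun p => if p.2 ≠ '_' then some p.1 else none)
  if 0 ≤ vis_pos ∧ vis_pos < (positions.length : Int) then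
    -- positions[vis_pos]; the guard makes the index in range, so the getD default is never used
    (PySem.List.pyGet? positions vis_pos).getD ((s.toList.length : Int))
  else (s.toList.length : Int)

-- ===== PRECONDITION & SPEC =====
def Spec_raw_pos_from_visible_py (s : String) (vis_pos : Int) (out : Int) : Prop := out = raw_pos_from_visible_py_alt s vis_pos
instance (s : String) (vis_pos : Int) (out : Int) : Decidable (Spec_raw_pos_from_visible_py s vis_pos out) := by unfold Spec_raw_pos_from_visible_py; infer_instance

-- ===== CLAIM (what is proved, stated in full; the proofs are below) =====
def Claim_equal_raw_pos_from_visible_py : Prop := ∀ (s : String) (vis_pos : Int), Dom_raw_pos_from_visible_py s vis_pos → Spec_raw_pos_from_visible_py s vis_pos (raw_pos_from_visible_py s vis_pos)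

-- ===== LEMMAS AND PROOFS =====

-- characterisation of A's loop: it returns the (vis-count)-th entry of the position table of l
theorem rawA_loop_eq (l : List (Int × Char)) : ∀ (vis count : Int),
    rawA_loop l vis count =
      if vis < count then none
      else (l.filterMap (fun p => if p.2 ≠ '_' then some p.1 else none))[(vis - count).toNat]? := by
  induction l with
  | nil => intro vis count; simp [rawA_loop]
  | cons hd tl ih =>
    intro vis count
    obtain ⟨idx, c⟩ := hd
    by_cases hc : c = '_'
    · simp [rawA_loop, hc, ih]
    · by_cases hv : count = vis
      · subst hv
        simp [rawA_loop, hc]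
      · simp only [rawA_loop, ne_eq, hc, not_false_eq_true, if_true, if_neg hv,
          List.filterMap_cons]
        rw [ih]
        by_cases hlt : vis < count
        · rw [if_pos (by omega), if_pos hlt]
        · rw [if_neg (by omega), if_neg hlt]
          have ht : (vis - count).toNat = (vis - (count + 1)).toNat + 1 := by omega
          rw [ht]
          simp [hc]

-- ===== VERDICT (by name: the statement is the Claim_ definition above) =====
theorem raw_pos_from_visible_py_spec : Claim_equal_raw_pos_from_visible_py := by
  intro s vis_pos _
  unfold Spec_raw_pos_from_visible_py raw_pos_from_visible_py raw_pos_from_visible_py_alt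
  rw [rawA_loop_eq]
  set positions := (PySem.List.enumerate s.toList).filterMap
      (fun p => if p.2 ≠ '_' then some p.1 else none) with hpos
  by_cases h : 0 ≤ vis_pos ∧ vis_pos < (positions.length : Int)
  · rw [if_pos h]
    rw [if_neg (by omega)]
    rw [PySem.List.pyGet?_of_nonneg _ h.1]
    have hlen : vis_pos.toNat < positions.length := by omega
    have : vis_pos - 0 = vis_pos := by omega
    rw [this]
    simp [List.getElem?_eq_getElem hlen]
  · rw [if_neg h]
    by_cases hneg : vis_pos < 0
    · rw [if_pos hneg]
    · rw [if_neg hneg]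
      have h0 : vis_pos - 0 = vis_pos := by omega
      rw [h0]
      have hle : positions.length ≤ vis_pos.toNat := by omega
      rw [List.getElem?_eq_none hle]
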